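-- pv_equiv track=rewrite | github.com/ahmedNwayyir/732A74_Introduction_to_Python | Labs/Lab_4/Other/Erik Anders/text_stats.py | followingwords
-- ===== SOURCE A (Python) =====
-- def followingwords(words):
--     d = {}
--
--     #dict of following words of every word
--     for counter, value in enumerate(words):
--         if counter == len(words)-1:
--             pass
--         else:
--             d[value][words[counter+1]] = d.setdefault(value,{}).setdefault(words[counter+1],0)+1
--     return d
-- ===== SOURCE B (Python) =====
-- def followingwords(words):
--     # Phase 1: flat tables over the adjacent-pair list (pair counts, followers per word);
--     # Phase 2: declarative comprehension reshape into the nested dict.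
--     pairs = list(zip(words, words[1:]))
--     counts = {}
--     for p in pairs:
--         counts[p] = counts.get(p, 0) + 1
--     succ = {}
--     for a, b in pairs:
--         succ.setdefault(a, []).append(b)
--     return {a: {b: counts[(a, b)] for b in dict.fromkeys(bs)}
--             for a, bs in succ.items()}
-- ===== Notes on version B (the rewrite author's own statement) =====
-- stated objective: alternative
-- what changed: A threads one nested dict through a single indexed loop with chained setdefault mutations; B first builds flat tables over the adjacent-pair list (pair counts and followers per word) and then reshapes them into the nested dict with a declarative comprehension.
import Mathlib
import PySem

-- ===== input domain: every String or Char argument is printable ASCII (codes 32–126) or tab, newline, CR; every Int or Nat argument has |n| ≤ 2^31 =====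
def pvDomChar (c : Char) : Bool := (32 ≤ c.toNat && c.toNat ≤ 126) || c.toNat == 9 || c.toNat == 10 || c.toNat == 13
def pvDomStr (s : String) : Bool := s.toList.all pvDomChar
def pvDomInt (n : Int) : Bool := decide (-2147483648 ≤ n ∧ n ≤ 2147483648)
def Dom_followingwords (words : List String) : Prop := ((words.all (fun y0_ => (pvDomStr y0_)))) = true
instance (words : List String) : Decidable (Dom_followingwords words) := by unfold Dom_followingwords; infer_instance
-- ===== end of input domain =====

-- B replaces A's single indexed loop threading a nested dict through setdefault chains by a flat
-- adjacent-pairs table reshaped with nested comprehensions (objective: alternative, not faster).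

-- ===== PORT A =====
def followingwords (words : List String) : List (String × List (String × Int)) :=
  let d : PySem.Dict String (PySem.Dict String Int) :=
    (PySem.List.enumerate words).foldl (fun d cv =>
      if cv.1 == ((words.length : Int) - 1) then d
      else
        -- words[counter+1]; in this branch counter+1 < len(words), so the IndexError arm is unreachable
        match PySem.List.pyGet? words (cv.1 + 1) with
        | none => d
        | some nxt =>
          -- d.setdefault(value,{}) returns the (shared, mutable) inner dict; .setdefault(next,0)
          -- appends next→0 to it if absent and returns its value; the assignment overwrites next
          let d1 := d.setdefault cv.2 PySem.Dict.empty
          let inner := d1.getD cv.2 PySem.Dict.empty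
          let inner1 := inner.setdefault nxt 0
          let rhs := inner1.getD nxt 0 + 1
          d1.insert cv.2 (inner1.insert nxt rhs)) PySem.Dict.empty
  d.items.map (fun kv => (kv.1, kv.2.items))

-- ===== PORT B =====
def followingwords_alt (words : List String) : List (String × List (String × Int)) :=
  let pairs := words.zip (PySem.List.slice words (some 1) none)   -- list(zip(words, words[1:]))
  let counts := pairs.foldl (fun c p => c.insert p (c.getD p 0 + 1)) PySem.Dict.empty
  let succ := pairs.foldl (fun s p =>
      -- succ.setdefault(a, []).append(b): the returned list is shared, the append mutates it in place
      let s1 := s.setdefault p.1 ([] : List String)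
      s1.insert p.1 (s1.getD p.1 [] ++ [p.2])) PySem.Dict.empty
  succ.items.map (fun kv =>                                        -- the comprehension over succ.items()
    (kv.1, (PySem.Set.ofList kv.2).map (fun b => (b, counts.getD (kv.1, b) 0))))

-- ===== PRECONDITION & SPEC =====
def Spec_followingwords (words : List String) (out : List (String × List (String × Int))) : Prop := out = followingwords_alt words
instance (words : List String) (out : List (String × List (String × Int))) : Decidable (Spec_followingwords words out) := by unfold Spec_followingwords; infer_instance

-- ===== CLAIM (what is proved, stated in full; the proofs are below) =====
def Claim_equal_followingwords : Prop := ∀ (words : List String), Dom_followingwords words → Spec_followingwords words (followingwords words)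

-- ===== LEMMAS AND PROOFS =====

-- the net effect of one loop iteration of A on the nested dict
def addPair (d : PySem.Dict String (PySem.Dict String Int)) (p : String × String) :
    PySem.Dict String (PySem.Dict String Int) :=
  d.modify p.1 PySem.Dict.empty (fun inner => inner.modify p.2 0 (· + 1))

-- A's loop body, with the enumerated full word list as a parameter
def fA (words : List String) : PySem.Dict String (PySem.Dict String Int) → Int × String → PySem.Dict String (PySem.Dict String Int) :=
  fun d cv =>
    if cv.1 == ((words.length : Int) - 1) then d
    else
      match PySem.List.pyGet? words (cv.1 + 1) with
      | none => d
      | some nxt =>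
        let d1 := d.setdefault cv.2 PySem.Dict.empty
        let inner := d1.getD cv.2 PySem.Dict.empty
        let inner1 := inner.setdefault nxt 0
        let rhs := inner1.getD nxt 0 + 1
        d1.insert cv.2 (inner1.insert nxt rhs)

-- B's inner set of followers of a, and B's per-word dict entry
def bsOf (ps : List (String × String)) (a : String) : PySem.Set String :=
  PySem.Set.ofList ((ps.filter (fun q => q.1 == a)).map Prod.snd)

def gOf (ps : List (String × String)) (a : String) : String × PySem.Dict String Int :=
  (a, PySem.Dict.mk ((bsOf ps a).map (fun b => (b, (ps.count (a, b) : Int)))))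

-- the nested dict described by B's comprehensions, as a Dict
def specD (ps : List (String × String)) : PySem.Dict String (PySem.Dict String Int) :=
  PySem.Dict.mk ((PySem.Set.ofList (ps.map Prod.fst)).map (gOf ps))

lemma insert_setdefault {ν : Type} (d : PySem.Dict String ν) (k : String) (v0 w : ν) :
    (d.setdefault k v0).insert k w = d.insert k w := by
  by_cases h : d.contains k = true
  · rw [PySem.Dict.setdefault_of_contains _ _ h]
  · rw [PySem.Dict.setdefault_of_not_contains _ _ (by simpa using h),
      PySem.Dict.insert_insert_self]

lemma stepA_eq (d : PySem.Dict String (PySem.Dict String Int)) (value nxt : String) :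
    (let d1 := d.setdefault value PySem.Dict.empty
     let inner := d1.getD value PySem.Dict.empty
     let inner1 := inner.setdefault nxt 0
     let rhs := inner1.getD nxt 0 + 1
     d1.insert value (inner1.insert nxt rhs)) = addPair d (value, nxt) := by
  simp only [addPair, PySem.Dict.modify, PySem.Dict.getD_setdefault_self, insert_setdefault]

lemma enumerate_append_singleton {α : Type} (xs : List α) (x : α) (s : Int) :
    PySem.List.enumerate (xs ++ [x]) s = PySem.List.enumerate xs s ++ [(s + xs.length, x)] := by
  induction xs generalizing s with
  | nil => simp [PySem.List.enumerate]
  | cons a t ih => simp [PySem.List.enumerate, ih]; ring_nf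

lemma mem_enumerate_bound {α : Type} (xs : List α) (s : Int) (iv : Int × α)
    (h : iv ∈ PySem.List.enumerate xs s) : s ≤ iv.1 ∧ iv.1 < s + xs.length := by
  induction xs generalizing s with
  | nil => simp [PySem.List.enumerate] at h
  | cons a t ih =>
    simp only [PySem.List.enumerate, List.mem_cons] at h
    rcases h with h | h
    · rw [h]; refine ⟨le_refl _, ?_⟩; simp
    · have := ih (s+1) h
      simp only [List.length_cons]
      push_cast
      omega

lemma zipTail_concat (l : List String) (y x : String) :
    ((l ++ [y]) ++ [x]).zip (((l ++ [y]) ++ [x]).tail)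
      = (l ++ [y]).zip ((l ++ [y]).tail) ++ [(y, x)] := by
  induction l with
  | nil => simp
  | cons a l ih =>
    cases l with
    | nil => simp
    | cons c l' => simpa using ih

lemma get?_mk_map {ν : Type} (l : List String) (h : String → ν) (x : String) :
    (PySem.Dict.mk (l.map (fun b => (b, h b)))).get? x = if x ∈ l then some (h x) else none := by
  induction l with
  | nil => simp [PySem.Dict.get?]
  | cons a t ih =>
    simp only [List.map_cons, PySem.Dict.get?_mk_cons, ih, List.mem_cons]
    by_cases hax : a = x
    · subst hax; simp
    · simp [beq_iff_eq, hax, Ne.symm hax]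

lemma contains_mk_map {ν : Type} (l : List String) (h : String → ν) (x : String) :
    (PySem.Dict.mk (l.map (fun b => (b, h b)))).contains x = decide (x ∈ l) := by
  rw [PySem.Dict.contains_eq_isSome_get?, get?_mk_map]
  by_cases hx : x ∈ l <;> simp [hx]

lemma mem_snd_filter (ps : List (String × String)) (a b : String) :
    b ∈ (ps.filter (fun q => q.1 == a)).map Prod.snd ↔ (a, b) ∈ ps := by
  constructor
  · rintro h
    simp only [List.mem_map, List.mem_filter, beq_iff_eq] at h
    obtain ⟨⟨a', b'⟩, ⟨hm, ha⟩, hb⟩ := h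
    simp at ha hb; subst ha; subst hb; exact hm
  · intro h
    exact List.mem_map.2 ⟨(a, b), List.mem_filter.2 ⟨h, by simp⟩, rfl⟩

lemma count_concat_ne (ps : List (String × String)) (p q : String × String) (h : q ≠ p) :
    (ps ++ [p]).count q = ps.count q := by
  simp [List.count_append, h.symm]

lemma filter_concat_fst_ne (ps : List (String × String)) (a b a' : String) (h : a' ≠ a) :
    (ps ++ [(a, b)]).filter (fun q => q.1 == a') = ps.filter (fun q => q.1 == a') := by
  simp [List.filter_append, beq_iff_eq, Ne.symm h]

lemma gOf_concat_ne (ps : List (String × String)) (a b a' : String) (h : a' ≠ a) :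
    gOf (ps ++ [(a, b)]) a' = gOf ps a' := by
  unfold gOf bsOf
  rw [filter_concat_fst_ne ps a b a' h]
  refine congrArg _ (congrArg _ (List.map_congr_left ?_))
  intro b' _
  have : ((a', b') : String × String) ≠ (a, b) := by
    intro hq; exact h (congrArg Prod.fst hq)
  rw [count_concat_ne ps _ _ this]

lemma get?_specD (ps : List (String × String)) (a : String) :
    (specD ps).get? a = if a ∈ ps.map Prod.fst
      then some (PySem.Dict.mk ((bsOf ps a).map (fun b => (b, (ps.count (a, b) : Int))))) else none := by
  unfold specD gOf
  rw [get?_mk_map (PySem.Set.ofList (ps.map Prod.fst))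
      (fun a => PySem.Dict.mk ((bsOf ps a).map (fun b => (b, (ps.count (a, b) : Int))))) a]
  by_cases h : a ∈ ps.map Prod.fst
  · rw [if_pos ((PySem.Set.mem_ofList _ _).2 h), if_pos h]
  · rw [if_neg (fun hm => h ((PySem.Set.mem_ofList _ _).1 hm)), if_neg h]

lemma contains_specD (ps : List (String × String)) (a : String) :
    (specD ps).contains a = decide (a ∈ ps.map Prod.fst) := by
  unfold specD gOf
  rw [contains_mk_map]
  simp [PySem.Set.mem_ofList]

lemma foldl_addPair_spec (ps : List (String × String)) :
    ps.foldl addPair PySem.Dict.empty = specD ps := by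
  induction ps using List.reverseRecOn with
  | nil => rfl
  | append_singleton ps p ih =>
    obtain ⟨a, b⟩ := p
    rw [List.foldl_append, List.foldl_cons, List.foldl_nil, ih]
    show (specD ps).insert a
        (((specD ps).getD a PySem.Dict.empty).insert b
          (((specD ps).getD a PySem.Dict.empty).getD b 0 + 1)) = specD (ps ++ [(a, b)])
    by_cases ha : a ∈ ps.map Prod.fst
    · -- outer key already present
      have hinner : (specD ps).getD a PySem.Dict.empty
          = PySem.Dict.mk ((bsOf ps a).map (fun b' => (b', (ps.count (a, b') : Int)))) := by
        rw [PySem.Dict.getD_eq_get?_getD, get?_specD, if_pos ha]; rfl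
      have hS : PySem.Set.ofList ((ps ++ [(a, b)]).map Prod.fst)
          = PySem.Set.ofList (ps.map Prod.fst) := by
        rw [List.map_append, List.map_cons, List.map_nil, PySem.Set.ofList_append_singleton,
          PySem.Set.add_of_mem (by rwa [PySem.Set.mem_ofList])]
      have hBs : bsOf (ps ++ [(a, b)]) a = (bsOf ps a).add b := by
        unfold bsOf
        rw [List.filter_append]
        simp [PySem.Set.ofList_append_singleton]
      -- the new inner dict equals the spec's inner dict at key a
      have hinnernew :
          ((specD ps).getD a PySem.Dict.empty).insert b
            (((specD ps).getD a PySem.Dict.empty).getD b 0 + 1)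
          = (gOf (ps ++ [(a, b)]) a).2 := by
        rw [hinner]
        have hget : (PySem.Dict.mk ((bsOf ps a).map (fun b' => (b', (ps.count (a, b') : Int))))).getD b 0
            = if b ∈ bsOf ps a then (ps.count (a, b) : Int) else 0 := by
          rw [PySem.Dict.getD_eq_get?_getD, get?_mk_map]
          by_cases hb : b ∈ bsOf ps a <;> simp [hb]
        by_cases hb : b ∈ bsOf ps a
        · -- follower already recorded: in-place overwrite
          have hc : (PySem.Dict.mk ((bsOf ps a).map (fun b' => (b', (ps.count (a, b') : Int))))).contains b = true := by
            rw [contains_mk_map]; simpa using hb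
          apply PySem.Dict.ext
          rw [PySem.Dict.items_insert_of_contains _ _ hc]
          show List.map _ (List.map _ (bsOf ps a)) = _
          rw [List.map_map]
          unfold gOf
          show _ = (PySem.Dict.mk ((bsOf (ps ++ [(a,b)]) a).map
              (fun b' => (b', ((ps ++ [(a,b)]).count (a, b') : Int))))).items
          rw [hBs, PySem.Set.add_of_mem hb]
          show _ = List.map _ (bsOf ps a)
          apply List.map_congr_left
          intro b' hb'
          by_cases hbb : b' = b
          · subst hbb
            simp [hget, hb, List.count_append]
          · have : ((a, b') : String × String) ≠ (a, b) := by
              intro hq; exact hbb (congrArg Prod.snd hq)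
            simp [Function.comp, hbb, count_concat_ne ps _ _ this]
        · -- new follower: appended at the end
          have hc : (PySem.Dict.mk ((bsOf ps a).map (fun b' => (b', (ps.count (a, b') : Int))))).contains b = false := by
            rw [contains_mk_map]; simpa using hb
          apply PySem.Dict.ext
          rw [PySem.Dict.items_insert_of_not_contains _ _ hc]
          unfold gOf
          show _ = ((bsOf (ps ++ [(a,b)]) a).map
              (fun b' => (b', ((ps ++ [(a,b)]).count (a, b') : Int))))
          rw [hBs, PySem.Set.add_of_not_mem hb, List.map_append]
          congr 1
          · apply List.map_congr_left
            intro b' hb'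
            have hbb : b' ≠ b := fun hq => hb (hq ▸ hb')
            have : ((a, b') : String × String) ≠ (a, b) := by
              intro hq; exact hbb (congrArg Prod.snd hq)
            rw [count_concat_ne ps _ _ this]
          · have h0 : ps.count (a, b) = 0 := by
              rw [List.count_eq_zero]
              intro hm; exact hb ((PySem.Set.mem_ofList _ _).2 ((mem_snd_filter ps a b).2 hm))
            simp [hget, hb, List.count_append, h0]
      -- outer: in-place overwrite at key a
      have hc : (specD ps).contains a = true := by rw [contains_specD]; simpa using ha
      apply PySem.Dict.ext
      rw [PySem.Dict.items_insert_of_contains _ _ hc]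
      show List.map _ ((PySem.Set.ofList (ps.map Prod.fst)).map (gOf ps)) = _
      rw [List.map_map]
      show _ = ((PySem.Set.ofList ((ps ++ [(a,b)]).map Prod.fst)).map (gOf (ps ++ [(a,b)])))
      rw [hS]
      apply List.map_congr_left
      intro a' ha'
      by_cases haa : a' = a
      · subst haa
        have h1 : ∀ x : String, ((gOf ps x).1 == x) = true := fun x => by simp [gOf]
        simp only [Function.comp]
        rw [hinnernew, if_pos (h1 _)]
        rfl
      · simp only [Function.comp]
        rw [gOf_concat_ne ps a b a' haa]
        have hbeq : ((gOf ps a').1 == a) = false := by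
          simpa [gOf] using haa
        simp [hbeq]
    · -- new outer key: appended at the end
      have hinner : (specD ps).getD a PySem.Dict.empty = PySem.Dict.empty := by
        rw [PySem.Dict.getD_eq_get?_getD, get?_specD, if_neg ha]; rfl
      have hc : (specD ps).contains a = false := by rw [contains_specD]; simpa using ha
      apply PySem.Dict.ext
      rw [PySem.Dict.items_insert_of_not_contains _ _ hc]
      have hS : PySem.Set.ofList ((ps ++ [(a, b)]).map Prod.fst)
          = PySem.Set.ofList (ps.map Prod.fst) ++ [a] := by
        rw [List.map_append, List.map_cons, List.map_nil, PySem.Set.ofList_append_singleton,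
          PySem.Set.add_of_not_mem (by rwa [PySem.Set.mem_ofList])]
      show _ = ((PySem.Set.ofList ((ps ++ [(a,b)]).map Prod.fst)).map (gOf (ps ++ [(a,b)])))
      rw [hS, List.map_append]
      congr 1
      · show (PySem.Set.ofList (ps.map Prod.fst)).map (gOf ps) = _
        apply List.map_congr_left
        intro a' ha'
        have haa : a' ≠ a := fun hq => ha (hq ▸ (PySem.Set.mem_ofList _ _).1 ha')
        exact (gOf_concat_ne ps a b a' haa).symm
      · -- the appended entry
        have hfilter : ps.filter (fun q => q.1 == a) = [] := by
          rw [List.filter_eq_nil_iff]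
          intro q hq
          simp only [beq_iff_eq]
          intro hqa
          exact ha (List.mem_map.2 ⟨q, hq, hqa⟩)
        have hBs : bsOf (ps ++ [(a, b)]) a = [b] := by
          have hone : (ps ++ [(a, b)]).filter (fun q => q.1 == a) = [(a, b)] := by
            rw [List.filter_append, hfilter]; simp
          unfold bsOf
          rw [hone]
          exact PySem.Set.ofList_eq_self_of_nodup [b] (List.nodup_singleton b)
        have h0 : ps.count (a, b) = 0 := by
          rw [List.count_eq_zero]
          intro hm
          exact ha (List.mem_map.2 ⟨(a, b), hm, rfl⟩)
        rw [hinner]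
        simp only [List.map_cons, List.map_nil, gOf, hBs]
        simp [PySem.Dict.getD_empty, List.count_append, h0,
          PySem.Dict.insert, PySem.Dict.contains_empty]
        rfl

lemma loopA_aux (words : List String) (d : PySem.Dict String (PySem.Dict String Int)) :
    (PySem.List.enumerate words).foldl (fA words) d
      = (words.zip words.tail).foldl addPair d := by
  induction words using List.reverseRecOn generalizing d with
  | nil => simp [PySem.List.enumerate]
  | append_singleton ys x ih =>
    rw [enumerate_append_singleton, List.foldl_append]
    have hskip : ∀ acc, fA (ys ++ [x]) acc (0 + (ys.length : Int), x) = acc := by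
      intro acc
      simp [fA]
    simp only [List.foldl_cons, List.foldl_nil, hskip]
    rcases List.eq_nil_or_concat ys with hnil | ⟨zs, y, hys⟩
    · subst hnil; simp [PySem.List.enumerate]
    · rw [List.concat_eq_append] at hys
      subst hys
      rw [enumerate_append_singleton, List.foldl_append]
      -- last processed element (zs.length, y) now sees its successor x
      have hlast : ∀ acc, fA ((zs ++ [y]) ++ [x]) acc (0 + (zs.length : Int), y) = addPair acc (y, x) := by
        intro acc
        have hguard : ¬ ((0 + (zs.length : Int)) == (((((zs ++ [y]) ++ [x]).length : Nat) : Int) - 1)) = true := by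
          simp; omega
        have hget : PySem.List.pyGet? ((zs ++ [y]) ++ [x]) (0 + (zs.length : Int) + 1) = some x := by
          rw [PySem.List.pyGet?_of_nonneg _ (show (0:Int) ≤ 0 + (zs.length:Int) + 1 by omega)]
          have : ((0:Int) + (zs.length : Int) + 1).toNat = (zs ++ [y]).length := by simp
          rw [this]
          simp
        simp only [fA, hguard, hget]
        exact stepA_eq acc y x
      simp only [List.foldl_cons, List.foldl_nil, hlast]
      -- on the earlier elements the loop body ignores the appended x
      have hcongr : (PySem.List.enumerate zs).foldl (fA ((zs ++ [y]) ++ [x])) d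
          = (PySem.List.enumerate zs).foldl (fA (zs ++ [y])) d := by
        apply PySem.List.foldl_congr_mem
        intro acc iv hm
        obtain ⟨h0, h1⟩ := mem_enumerate_bound zs 0 iv hm
        have hg1 : ¬ (iv.1 == ((((zs ++ [y]) ++ [x]).length : Nat) : Int) - 1) = true := by
          simp at h1 ⊢; omega
        have hg2 : ¬ (iv.1 == (((zs ++ [y]).length : Nat) : Int) - 1) = true := by
          simp at h1 ⊢; omega
        have hget : PySem.List.pyGet? ((zs ++ [y]) ++ [x]) (iv.1 + 1) = PySem.List.pyGet? (zs ++ [y]) (iv.1 + 1) := by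
          rw [PySem.List.pyGet?_of_nonneg _ (show (0:Int) ≤ iv.1 + 1 by omega),
            PySem.List.pyGet?_of_nonneg _ (show (0:Int) ≤ iv.1 + 1 by omega)]
          rw [List.getElem?_append_left]
          simp at h1 ⊢; omega
        simp only [fA, hg1, hg2, hget]
      rw [hcongr]
      -- the full loop on zs ++ [y] is the same fold: its final iteration is a skip
      have hfull : (PySem.List.enumerate zs).foldl (fA (zs ++ [y])) d
          = (PySem.List.enumerate (zs ++ [y])).foldl (fA (zs ++ [y])) d := by
        rw [enumerate_append_singleton, List.foldl_append]
        have : ∀ acc, fA (zs ++ [y]) acc (0 + (zs.length : Int), y) = acc := by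
          intro acc; simp [fA]
        simp only [List.foldl_cons, List.foldl_nil, this]
      rw [hfull, ih, zipTail_concat, List.foldl_append]
      simp

lemma loopA_eq (words : List String) (d : PySem.Dict String (PySem.Dict String Int)) :
    (PySem.List.enumerate words).foldl (fun d cv =>
      if cv.1 == ((words.length : Int) - 1) then d
      else
        match PySem.List.pyGet? words (cv.1 + 1) with
        | none => d
        | some nxt =>
          let d1 := d.setdefault cv.2 PySem.Dict.empty
          let inner := d1.getD cv.2 PySem.Dict.empty
          let inner1 := inner.setdefault nxt 0
          let rhs := inner1.getD nxt 0 + 1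
          d1.insert cv.2 (inner1.insert nxt rhs)) d
      = (words.zip words.tail).foldl addPair d :=
  loopA_aux words d

lemma alt_eq (words : List String) :
    followingwords_alt words
      = (specD (words.zip (PySem.List.slice words (some 1) none))).items.map
          (fun kv => (kv.1, kv.2.items)) := by
  unfold followingwords_alt
  dsimp only
  set ps := words.zip (PySem.List.slice words (some 1) none) with hps
  have hstep : (fun (s : PySem.Dict String (List String)) (p : String × String) =>
      let s1 := s.setdefault p.1 ([] : List String)
      s1.insert p.1 (s1.getD p.1 [] ++ [p.2]))
      = (fun s p => s.modify p.1 [] (fun x => x ++ [p.2])) := by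
    funext s p
    simp only [PySem.Dict.modify, PySem.Dict.getD_setdefault_self, insert_setdefault]
  rw [hstep]
  have hkeys : (ps.foldl (fun s p => s.modify p.1 [] (fun x => x ++ [p.2])) PySem.Dict.empty).keys
      = PySem.Set.ofList (ps.map Prod.fst) := by
    rw [PySem.Dict.keys_foldl_modify_key ps Prod.fst [] (fun _ p => fun x => x ++ [p.2]) PySem.Dict.empty,
      PySem.Dict.keys_empty, PySem.Set.update_nil_left]
  have hnodup : (ps.foldl (fun s p => s.modify p.1 [] (fun x => x ++ [p.2])) PySem.Dict.empty).keys.Nodup := by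
    rw [hkeys]; exact PySem.Set.nodup_ofList _
  rw [PySem.Dict.items_eq_map_keys _ hnodup [], hkeys, List.map_map]
  simp only [specD, List.map_map]
  apply List.map_congr_left
  intro a ha
  simp only [Function.comp]
  have hgetD : (ps.foldl (fun s p => s.modify p.1 [] (fun x => x ++ [p.2])) PySem.Dict.empty).getD a []
      = (ps.filter (fun p => p.1 == a)).map Prod.snd := by
    rw [PySem.Dict.getD_foldl_modify_append]
    simp [PySem.Dict.getD_empty]
  have hcnt : ∀ q : String × String,
      (ps.foldl (fun c p => c.insert p (c.getD p 0 + 1)) PySem.Dict.empty).getD q 0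
        = (ps.count q : Int) := by
    intro q
    rw [PySem.Dict.getD_foldl_insert_add_one]
    simp [PySem.Dict.getD_empty]
  rw [hgetD]
  simp only [gOf, bsOf, hcnt]

-- ===== VERDICT (by name: the statement is the Claim_ definition above) =====
theorem followingwords_spec : Claim_equal_followingwords := by
  intro words _
  show followingwords words = followingwords_alt words
  unfold followingwords
  rw [alt_eq, loopA_eq, foldl_addPair_spec, PySem.List.slice_from_one]
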